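-- pv_equiv track=rewrite | github.com/isayeu/eurika_2.0 | eurika/reasoning/planner_rules.py | diff_hints_for
-- ===== SOURCE A (Python) =====
-- from typing import Dict, List, Optional
--
-- DIFF_HINTS: Dict[tuple[str, str], List[str]] = {
--     ("god_module", "split_module"): [
--         "Extract coherent sub-responsibilities into separate modules (e.g. core, analysis, reporting).",
--         "Identify distinct concerns and split this module into focused units.",
--         "Reduce total degree (fan-in + fan-out) via extraction.",
--     ],
--     ("god_module", "refactor_module"): [
--         "Extract coherent sub-responsibilities into separate modules (e.g. core, analysis, reporting).",
--         "Identify distinct concerns and split this module into focused units.",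
--         "Reduce total degree (fan-in + fan-out) via extraction.",
--     ],
--     ("bottleneck", "introduce_facade"): [
--         "Introduce a facade or boundary to reduce direct fan-in.",
--         "Create a stable public API for this module; let internal structure evolve independently.",
--         "Limit the number of modules that import this file directly.",
--     ],
--     ("hub", "refactor_module"): [
--         "Split outgoing dependencies across clearer layers or services.",
--         "Introduce intermediate abstractions to decouple from concrete implementations.",
--         "Align with semantic roles and system topology.",
--     ],
--     ("hub", "split_module"): [
--         "Split outgoing dependencies across clearer layers or services.",
--         "Extract coherent sub-graphs by domain or layer.",
--         "Reduce fan-out via extraction into focused modules.",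
--     ],
--     ("cyclic_dependency", "refactor_dependencies"): [
--         "Break import cycles via inversion of dependencies or adapters.",
--         "Extract shared interfaces; depend on abstractions, not implementations.",
--         "Consider introducing a shared-core module used by both sides.",
--     ],
-- }
--
-- def diff_hints_for(smell_type: str, action_kind: str) -> List[str]:
--     """Return tailored diff hints for (smell_type, action_kind)."""
--     key = (smell_type, action_kind)
--     if key in DIFF_HINTS:
--         return DIFF_HINTS[key]
--     if smell_type != "unknown":
--         for (s, _), hints in DIFF_HINTS.items():
--             if s == smell_type:
--                 return hints
--     return [
--         "Split responsibilities or introduce a facade where appropriate.",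
--         "Reduce excessive fan-in/fan-out.",
--         "Align with semantic roles and system topology.",
--     ]
-- ===== SOURCE B (Python) =====
-- from typing import Dict, List
--
-- DIFF_HINTS: Dict[tuple, List[str]] = {
--     ("god_module", "split_module"): [
--         "Extract coherent sub-responsibilities into separate modules (e.g. core, analysis, reporting).",
--         "Identify distinct concerns and split this module into focused units.",
--         "Reduce total degree (fan-in + fan-out) via extraction.",
--     ],
--     ("god_module", "refactor_module"): [
--         "Extract coherent sub-responsibilities into separate modules (e.g. core, analysis, reporting).",
--         "Identify distinct concerns and split this module into focused units.",
--         "Reduce total degree (fan-in + fan-out) via extraction.",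
--     ],
--     ("bottleneck", "introduce_facade"): [
--         "Introduce a facade or boundary to reduce direct fan-in.",
--         "Create a stable public API for this module; let internal structure evolve independently.",
--         "Limit the number of modules that import this file directly.",
--     ],
--     ("hub", "refactor_module"): [
--         "Split outgoing dependencies across clearer layers or services.",
--         "Introduce intermediate abstractions to decouple from concrete implementations.",
--         "Align with semantic roles and system topology.",
--     ],
--     ("hub", "split_module"): [
--         "Split outgoing dependencies across clearer layers or services.",
--         "Extract coherent sub-graphs by domain or layer.",
--         "Reduce fan-out via extraction into focused modules.",
--     ],
--     ("cyclic_dependency", "refactor_dependencies"): [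
--         "Break import cycles via inversion of dependencies or adapters.",
--         "Extract shared interfaces; depend on abstractions, not implementations.",
--         "Consider introducing a shared-core module used by both sides.",
--     ],
-- }
--
-- _DEFAULT_HINTS: List[str] = [
--     "Split responsibilities or introduce a facade where appropriate.",
--     "Reduce excessive fan-in/fan-out.",
--     "Align with semantic roles and system topology.",
-- ]
--
--
-- def diff_hints_for(smell_type: str, action_kind: str) -> List[str]:
--     """Return tailored diff hints for (smell_type, action_kind).
--
--     Single ranked scan: each table entry is scored (2 = exact key match,
--     1 = same smell type unless it is "unknown", 0 = no match) and the
--     first entry of the highest score wins; the default is score 0.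
--     """
--     best_rank = 0
--     best = _DEFAULT_HINTS
--     for (s, a), hints in DIFF_HINTS.items():
--         if s == smell_type and a == action_kind:
--             rank = 2
--         elif s == smell_type and smell_type != "unknown":
--             rank = 1
--         else:
--             rank = 0
--         if rank > best_rank:
--             best_rank, best = rank, hints
--             if rank == 2:
--                 break
--     return best
-- ===== Notes on version B (the rewrite author's own statement) =====
-- stated objective: alternative
-- what changed: Replaces A's three staged lookups (exact dict membership test + index, then a second scan by smell type, then default) with one ranked single pass over the table that keeps the first entry of the highest match score (2 exact, 1 smell-only, 0 none) with an accumulator and default as the score-0 seed.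
import Mathlib
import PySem

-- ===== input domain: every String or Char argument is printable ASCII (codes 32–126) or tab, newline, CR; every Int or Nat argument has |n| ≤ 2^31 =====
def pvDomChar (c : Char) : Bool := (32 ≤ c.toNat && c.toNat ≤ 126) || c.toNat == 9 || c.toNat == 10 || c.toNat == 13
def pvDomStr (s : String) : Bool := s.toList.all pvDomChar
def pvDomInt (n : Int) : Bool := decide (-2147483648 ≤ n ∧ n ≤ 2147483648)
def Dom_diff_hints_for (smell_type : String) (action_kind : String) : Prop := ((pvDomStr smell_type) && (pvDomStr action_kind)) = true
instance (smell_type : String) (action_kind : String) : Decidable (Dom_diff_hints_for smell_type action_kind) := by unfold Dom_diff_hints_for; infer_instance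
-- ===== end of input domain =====

-- B replaces A's staged lookups (exact key, then smell-type scan, then default) with one
-- ranked pass keeping the first entry of the highest match score (objective: alternative).


-- ===== PORT A =====
-- the hint lists of DIFF_HINTS, named once (the Python repeats the god_module list verbatim)
def HINTS_GOD : List String := [
  "Extract coherent sub-responsibilities into separate modules (e.g. core, analysis, reporting).",
  "Identify distinct concerns and split this module into focused units.",
  "Reduce total degree (fan-in + fan-out) via extraction."]
def HINTS_BOTTLENECK : List String := [
  "Introduce a facade or boundary to reduce direct fan-in.",
  "Create a stable public API for this module; let internal structure evolve independently.",
  "Limit the number of modules that import this file directly."]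
def HINTS_HUB_REFACTOR : List String := [
  "Split outgoing dependencies across clearer layers or services.",
  "Introduce intermediate abstractions to decouple from concrete implementations.",
  "Align with semantic roles and system topology."]
def HINTS_HUB_SPLIT : List String := [
  "Split outgoing dependencies across clearer layers or services.",
  "Extract coherent sub-graphs by domain or layer.",
  "Reduce fan-out via extraction into focused modules."]
def HINTS_CYCLIC : List String := [
  "Break import cycles via inversion of dependencies or adapters.",
  "Extract shared interfaces; depend on abstractions, not implementations.",
  "Consider introducing a shared-core module used by both sides."]

def DIFF_HINTS : PySem.Dict (String × String) (List String) := PySem.Dict.ofList [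
  (("god_module", "split_module"), HINTS_GOD),
  (("god_module", "refactor_module"), HINTS_GOD),
  (("bottleneck", "introduce_facade"), HINTS_BOTTLENECK),
  (("hub", "refactor_module"), HINTS_HUB_REFACTOR),
  (("hub", "split_module"), HINTS_HUB_SPLIT),
  (("cyclic_dependency", "refactor_dependencies"), HINTS_CYCLIC)]

def DEFAULT_HINTS : List String := [
  "Split responsibilities or introduce a facade where appropriate.",
  "Reduce excessive fan-in/fan-out.",
  "Align with semantic roles and system topology."]

-- A's 'for (s, _), hints in DIFF_HINTS.items(): if s == smell_type: return hints'
def scanSmell (smell_type : String) : List ((String × String) × List String) → Option (List String)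
  | [] => none
  | (k, hints) :: rest => if k.1 == smell_type then some hints else scanSmell smell_type rest

def diff_hints_for (smell_type : String) (action_kind : String) : List String :=
  let key := (smell_type, action_kind)
  match DIFF_HINTS.get? key with
  | some h => h
  | none =>
    if smell_type ≠ "unknown" then
      match scanSmell smell_type DIFF_HINTS.items with
      | some h => h
      | none => DEFAULT_HINTS
    else DEFAULT_HINTS

-- ===== PORT B =====
-- Source B's loop: first entry of the highest score wins (2 exact, 1 smell-only, 0 none);
-- 'if rank == 2: break' is the early return on an exact match
def rankedScan (st ak : String) : List ((String × String) × List String) → Int → List String → List String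
  | [], _, best => best
  | (k, hints) :: rest, best_rank, best =>
    let rank : Int :=
      if k.1 == st && k.2 == ak then 2
      else if k.1 == st && st ≠ "unknown" then 1
      else 0
    if rank > best_rank then
      (if rank == 2 then hints else rankedScan st ak rest rank hints)
    else rankedScan st ak rest best_rank best

def diff_hints_for_alt (smell_type : String) (action_kind : String) : List String :=
  rankedScan smell_type action_kind DIFF_HINTS.items 0 DEFAULT_HINTS

-- ===== PRECONDITION & SPEC =====
def Spec_diff_hints_for (smell_type : String) (action_kind : String) (out : List String) : Prop := out = diff_hints_for_alt smell_type action_kind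
instance (smell_type : String) (action_kind : String) (out : List String) : Decidable (Spec_diff_hints_for smell_type action_kind out) := by unfold Spec_diff_hints_for; infer_instance

-- ===== CLAIM (what is proved, stated in full; the proofs are below) =====
def Claim_equal_diff_hints_for : Prop := ∀ (smell_type : String) (action_kind : String), Dom_diff_hints_for smell_type action_kind → Spec_diff_hints_for smell_type action_kind (diff_hints_for smell_type action_kind)

-- ===== LEMMAS AND PROOFS =====

-- ===== VERDICT (by name: the statement is the Claim_ definition above) =====
theorem diff_hints_for_spec : Claim_equal_diff_hints_for := by
  intro s a _
  unfold Spec_diff_hints_for diff_hints_for diff_hints_for_alt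
  rw [show DIFF_HINTS = PySem.Dict.mk [
      (("god_module", "split_module"), HINTS_GOD),
      (("god_module", "refactor_module"), HINTS_GOD),
      (("bottleneck", "introduce_facade"), HINTS_BOTTLENECK),
      (("hub", "refactor_module"), HINTS_HUB_REFACTOR),
      (("hub", "split_module"), HINTS_HUB_SPLIT),
      (("cyclic_dependency", "refactor_dependencies"), HINTS_CYCLIC)] from rfl]
  by_cases h1 : ("god_module" : String) = s
  · subst h1
    by_cases a1 : ("split_module" : String) = a
    · subst a1; rfl
    · by_cases a2 : ("refactor_module" : String) = a
      · subst a2; rfl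
      · simp [PySem.Dict.get?, rankedScan, scanSmell, beq_iff_eq, a1, a2]
  · by_cases h2 : ("bottleneck" : String) = s
    · subst h2
      by_cases a1 : ("introduce_facade" : String) = a
      · subst a1; rfl
      · simp [PySem.Dict.get?, rankedScan, scanSmell, beq_iff_eq, a1]
    · by_cases h3 : ("hub" : String) = s
      · subst h3
        by_cases a1 : ("refactor_module" : String) = a
        · subst a1; rfl
        · by_cases a2 : ("split_module" : String) = a
          · subst a2; rfl
          · simp [PySem.Dict.get?, rankedScan, scanSmell, beq_iff_eq, a1, a2]
      · by_cases h4 : ("cyclic_dependency" : String) = s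
        · subst h4
          by_cases a1 : ("refactor_dependencies" : String) = a
          · subst a1; rfl
          · simp [PySem.Dict.get?, rankedScan, scanSmell, beq_iff_eq, a1]
        · -- s matches no table smell: A falls through both lookups, B scores every entry 0
          simp [PySem.Dict.get?, rankedScan, scanSmell, beq_iff_eq, h1, h2, h3, h4]
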